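-- pv_equiv track=rewrite | github.com/AWHerzig/AWH_Curling3 | DirectoryWide.py | index_ignore_none
-- ===== SOURCE A (Python) =====
-- def index_ignore_none(lst, item):
--     filtered_index = 0
--     for x in lst:
--         if x is None:
--             continue
--         if x == item:
--             return filtered_index
--         filtered_index += 1
--     raise ValueError(f"{item} is not in list")
-- ===== SOURCE B (Python) =====
-- def index_ignore_none(lst, item):
--     filtered = [x for x in lst if x is not None]
--     try:
--         return filtered.index(item)
--     except ValueError:
--         raise ValueError(f"{item} is not in list")
-- ===== Notes on version B (the rewrite author's own statement) =====
-- stated objective: idiomatic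
-- what changed: Replaces the interleaved skip/compare/count loop by a filter pass that drops None entries followed by a list.index search on the projection.
import Mathlib
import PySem

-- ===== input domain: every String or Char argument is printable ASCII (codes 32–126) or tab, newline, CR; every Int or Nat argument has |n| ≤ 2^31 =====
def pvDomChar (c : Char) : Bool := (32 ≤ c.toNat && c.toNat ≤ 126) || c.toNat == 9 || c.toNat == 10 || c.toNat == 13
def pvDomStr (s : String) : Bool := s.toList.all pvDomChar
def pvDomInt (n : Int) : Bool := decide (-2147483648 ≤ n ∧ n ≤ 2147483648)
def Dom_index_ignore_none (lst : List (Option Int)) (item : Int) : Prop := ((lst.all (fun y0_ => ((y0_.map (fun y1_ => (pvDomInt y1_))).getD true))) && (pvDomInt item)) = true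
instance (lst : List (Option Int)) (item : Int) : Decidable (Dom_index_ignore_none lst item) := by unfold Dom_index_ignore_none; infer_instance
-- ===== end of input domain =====

-- B replaces A's interleaved skip/compare/count loop by a None-filter pass followed by an index search (idiomatic decomposition).
-- Pre_ excludes inputs where item is not among the non-None elements: there A (and B) raise ValueError.


-- ===== PORT A =====
-- the single loop: skip None, return the running count on match, else bump the count
def indexIgnoreNoneLoopA (item : Int) : List (Option Int) → Int → Int
  | [], _ => 0   -- Python raises ValueError here; excluded by Pre_
  | none :: xs, fi => indexIgnoreNoneLoopA item xs fi
  | some x :: xs, fi => if x = item then fi else indexIgnoreNoneLoopA item xs (fi + 1)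

def index_ignore_none (lst : List (Option Int)) (item : Int) : Int :=
  indexIgnoreNoneLoopA item lst 0

-- ===== PORT B =====
def index_ignore_none_alt (lst : List (Option Int)) (item : Int) : Int :=
  let filtered := lst.filterMap (fun x => x)       -- [x for x in lst if x is not None]
  match PySem.List.index? filtered item with       -- filtered.index(item)
  | some k => (k : Int)
  | none => 0                                      -- Python raises ValueError here; excluded by Pre_

-- ===== PRECONDITION & SPEC =====
-- Pre_ excludes exactly the inputs on which A raises ValueError (item absent from the non-None elements).
def Pre_index_ignore_none (lst : List (Option Int)) (item : Int) : Prop := (some item) ∈ lst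
instance (lst : List (Option Int)) (item : Int) : Decidable (Pre_index_ignore_none lst item) := by unfold Pre_index_ignore_none; infer_instance
def pvWitness_index_ignore_none : List (Option Int) × Int := ([none, some 3, none, some 7], 7)

def Spec_index_ignore_none (lst : List (Option Int)) (item : Int) (out : Int) : Prop := out = index_ignore_none_alt lst item
instance (lst : List (Option Int)) (item : Int) (out : Int) : Decidable (Spec_index_ignore_none lst item out) := by unfold Spec_index_ignore_none; infer_instance

-- ===== CLAIM (what is proved, stated in full; the proofs are below) =====
def Claim_equal_index_ignore_none : Prop := ∀ (lst : List (Option Int)) (item : Int), Dom_index_ignore_none lst item → Pre_index_ignore_none lst item → Spec_index_ignore_none lst item (index_ignore_none lst item)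

-- ===== LEMMAS AND PROOFS =====
theorem loopA_eq (item : Int) (lst : List (Option Int)) (fi : Int)
    (h : (some item) ∈ lst) :
    indexIgnoreNoneLoopA item lst fi =
      fi + ((PySem.List.index? (lst.filterMap (fun x => x)) item).map (Int.ofNat)).getD 0 := by
  induction lst generalizing fi with
  | nil => cases h
  | cons hd tl ih =>
    cases hd with
    | none =>
      have h' : (some item) ∈ tl := by simpa using h
      simp only [indexIgnoreNoneLoopA, List.filterMap_cons_none]
      exact ih fi h'
    | some x =>
      simp only [indexIgnoreNoneLoopA]
      by_cases hx : x = item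
      · subst hx
        rw [show List.filterMap (fun x => x) (some x :: tl) = x :: List.filterMap (fun x => x) tl from rfl,
            PySem.List.index?_cons_self]
        simp
      · have h' : (some item) ∈ tl := by
          rcases List.mem_cons.mp h with h1 | h1
          · exact absurd (Option.some.inj h1.symm) hx
          · exact h1
        rw [if_neg hx,
          show List.filterMap (fun x => x) (some x :: tl) = x :: List.filterMap (fun x => x) tl from rfl,
          PySem.List.index?_cons_of_ne _ hx, ih (fi + 1) h']
        have hmem : item ∈ tl.filterMap (fun x => x) := by
          simpa [List.mem_filterMap] using h'
        rcases (PySem.List.index?_isSome_iff (xs := tl.filterMap (fun x => x)) (v := item)).mpr hmem with hs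
        rcases Option.isSome_iff_exists.mp hs with ⟨k, hk⟩
        rw [hk]
        simp
        omega

-- ===== VERDICT (by name: the statement is the Claim_ definition above) =====
theorem index_ignore_none_spec : Claim_equal_index_ignore_none := by
  intro lst item _ hpre
  unfold Spec_index_ignore_none index_ignore_none index_ignore_none_alt
  rw [loopA_eq item lst 0 hpre]
  cases hk : PySem.List.index? (lst.filterMap (fun x => x)) item <;>
    rw [PySem.List.index?_eq_idxOf?] at hk <;> simp [hk]
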